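-- pv_equiv track=rewrite | github.com/pypi-data/pypi-mirror-60 | packages/MechTruffleHog/MechTruffleHog-1.0.0.dev1579764283-py2.py3-none-any.whl/truffleHog/truffleHog.py | get_strings_of_set
-- ===== SOURCE A (Python) =====
-- def get_strings_of_set(word, char_set, threshold=20):
--     count = 0
--     letters = ""
--     strings = set()
--     for char in word:
--         if char in char_set:
--             letters += char
--             count += 1
--         else:
--             if count > threshold:
--                 strings.add(letters)
--             letters = ""
--             count = 0
--     if count > threshold:
--         strings.add(letters)
--     return strings
-- ===== SOURCE B (Python) =====
-- def get_strings_of_set(word, char_set, threshold=20):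
--     # Split word at every char not in char_set (keeping empty pieces), then filter by length.
--     pieces = []
--     start = 0
--     for i, ch in enumerate(word):
--         if ch not in char_set:
--             pieces.append(word[start:i])
--             start = i + 1
--     pieces.append(word[start:])
--     return {p for p in pieces if len(p) > threshold}
-- ===== Notes on version B (the rewrite author's own statement) =====
-- stated objective: alternative
-- what changed: Replaces A's incremental count/letters state machine with inline threshold flushes by a split-then-filter pass: record separator positions to cut word into pieces (slices), then build the result set by filtering pieces by length.
import Mathlib
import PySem

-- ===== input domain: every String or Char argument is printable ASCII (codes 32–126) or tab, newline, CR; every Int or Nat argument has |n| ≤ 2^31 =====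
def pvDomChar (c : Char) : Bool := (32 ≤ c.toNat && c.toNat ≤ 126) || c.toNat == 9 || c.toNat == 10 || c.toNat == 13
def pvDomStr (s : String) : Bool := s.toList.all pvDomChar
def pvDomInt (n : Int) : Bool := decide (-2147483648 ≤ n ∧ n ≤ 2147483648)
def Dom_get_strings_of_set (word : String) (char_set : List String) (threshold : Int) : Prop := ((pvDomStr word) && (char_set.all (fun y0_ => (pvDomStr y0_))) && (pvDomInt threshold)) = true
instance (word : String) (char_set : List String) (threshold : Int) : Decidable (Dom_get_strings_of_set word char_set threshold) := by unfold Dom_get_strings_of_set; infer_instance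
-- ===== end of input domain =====

-- B replaces A's incremental count/letters state machine by a split-then-filter pass
-- (cut word at each disallowed char into pieces, then filter pieces by length); same cost, no speed claim.

-- ===== PORT A =====
-- A: one pass keeping (count, letters, strings); flush on each disallowed char and at the end.
-- (letters is kept as List Char — Python string concatenation is list append; String.ofList at add time.)
def get_strings_of_set (word : String) (char_set : List String) (threshold : Int) : List String :=
  let fin := word.toList.foldl
    (fun (st : Int × List Char × PySem.Set String) c =>
      if char_set.contains (String.singleton c) then
        (st.1 + 1, st.2.1 ++ [c], st.2.2)
      else
        if st.1 > threshold then (0, [], PySem.Set.add st.2.2 (String.ofList st.2.1))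
        else (0, [], st.2.2))
    (0, [], PySem.Set.empty)
  if fin.1 > threshold then PySem.Set.add fin.2.2 (String.ofList fin.2.1) else fin.2.2

-- ===== PORT B =====
-- B: collect the pieces word[start:i] cut at each disallowed char (and the trailing word[start:]),
-- then build the set from the pieces longer than the threshold.
def get_strings_of_set_alt (word : String) (char_set : List String) (threshold : Int) : List String :=
  let wl := word.toList
  let st := (PySem.List.enumerate wl 0).foldl
    (fun (st : List (List Char) × Int) (p : Int × Char) =>
      if !char_set.contains (String.singleton p.2) then
        (st.1 ++ [PySem.List.slice wl (some st.2) (some p.1)], p.1 + 1)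
      else st)
    ([], 0)
  let ps := st.1 ++ [PySem.List.slice wl (some st.2) none]
  ps.foldl
    (fun S p => if (p.length : Int) > threshold then PySem.Set.add S (String.ofList p) else S)
    PySem.Set.empty

-- ===== PRECONDITION & SPEC =====
def Spec_get_strings_of_set (word : String) (char_set : List String) (threshold : Int) (out : List String) : Prop := out = get_strings_of_set_alt word char_set threshold
instance (word : String) (char_set : List String) (threshold : Int) (out : List String) : Decidable (Spec_get_strings_of_set word char_set threshold out) := by unfold Spec_get_strings_of_set; infer_instance

-- ===== CLAIM (what is proved, stated in full; the proofs are below) =====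
def Claim_equal_get_strings_of_set : Prop := ∀ (word : String) (char_set : List String) (threshold : Int), Dom_get_strings_of_set word char_set threshold → Spec_get_strings_of_set word char_set threshold (get_strings_of_set word char_set threshold)

-- ===== LEMMAS AND PROOFS =====

-- the maximal runs of allowed chars, split at each disallowed char (empty runs kept),
-- as (first piece, remaining pieces)
def pvPieces (k : Char → Bool) : List Char → (List Char × List (List Char))
  | [] => ([], [])
  | c :: cs =>
    let ps := pvPieces k cs
    if k c then (c :: ps.1, ps.2) else ([], ps.1 :: ps.2)

-- the common filter-into-set pass
def pvProc (t : Int) (S : PySem.Set String) (ps : List (List Char)) : PySem.Set String :=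
  ps.foldl (fun S p => if (p.length : Int) > t then PySem.Set.add S (String.ofList p) else S) S

lemma pvA_loop (char_set : List String) (t : Int) :
    ∀ (cs acc : List Char) (S : PySem.Set String),
      (let fin := cs.foldl
        (fun (st : Int × List Char × PySem.Set String) c =>
          if char_set.contains (String.singleton c) then
            (st.1 + 1, st.2.1 ++ [c], st.2.2)
          else
            if st.1 > t then (0, [], PySem.Set.add st.2.2 (String.ofList st.2.1))
            else (0, [], st.2.2))
        ((acc.length : Int), acc, S)
       if fin.1 > t then PySem.Set.add fin.2.2 (String.ofList fin.2.1) else fin.2.2)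
      = pvProc t S ((acc ++ (pvPieces (fun c => char_set.contains (String.singleton c)) cs).1)
                     :: (pvPieces (fun c => char_set.contains (String.singleton c)) cs).2) := by
  intro cs
  induction cs with
  | nil => intro acc S; simp [pvPieces, pvProc]
  | cons c cs ih =>
    intro acc S
    by_cases h : char_set.contains (String.singleton c)
    · have hlen : ((acc.length : Int) + 1) = (((acc ++ [c]).length : Nat) : Int) := by simp
      simp only [List.foldl_cons, h, if_true, hlen]
      rw [ih (acc ++ [c]) S]
      simp only [pvPieces, h, if_true, List.append_assoc, List.singleton_append]
    · by_cases ht : (acc.length : Int) > t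
      · have ih' := ih [] (PySem.Set.add S (String.ofList acc))
        simp only [List.length_nil, Nat.cast_zero, List.nil_append] at ih'
        simp only [List.foldl_cons, h, Bool.false_eq_true, if_false, ht, if_true]
        rw [ih']
        simp only [pvPieces, h, Bool.false_eq_true, if_false, List.append_nil, pvProc,
          List.foldl_cons, ht, if_true]
      · have ih' := ih [] S
        simp only [List.length_nil, Nat.cast_zero, List.nil_append] at ih'
        simp only [List.foldl_cons, h, Bool.false_eq_true, if_false, ht]
        rw [ih']
        simp only [pvPieces, h, Bool.false_eq_true, if_false, List.append_nil, pvProc,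
          List.foldl_cons, ht]

lemma pvB_loop (char_set : List String) :
    ∀ (v u : List Char) (ps : List (List Char)) (s : Nat), s ≤ u.length →
      (let st := (PySem.List.enumerate v (u.length : Int)).foldl
        (fun (st : List (List Char) × Int) (p : Int × Char) =>
          if !char_set.contains (String.singleton p.2) then
            (st.1 ++ [PySem.List.slice (u ++ v) (some st.2) (some p.1)], p.1 + 1)
          else st)
        (ps, (s : Int))
       st.1 ++ [PySem.List.slice (u ++ v) (some st.2) none])
      = ps ++ ((u.drop s ++ (pvPieces (fun c => char_set.contains (String.singleton c)) v).1)
                :: (pvPieces (fun c => char_set.contains (String.singleton c)) v).2) := by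
  intro v
  induction v with
  | nil =>
    intro u ps s hs
    simp [PySem.List.enumerate_nil, pvPieces, PySem.List.slice_from_natCast]
  | cons c v ih =>
    intro u ps s hs
    rw [PySem.List.enumerate_cons]
    by_cases h : char_set.contains (String.singleton c)
    · simp only [List.foldl_cons, h, Bool.not_true, Bool.false_eq_true, if_false]
      have hv : u ++ c :: v = (u ++ [c]) ++ v := by simp
      have hlen : (u.length : Int) + 1 = (((u ++ [c]).length : Nat) : Int) := by simp
      rw [hv, hlen, ih (u ++ [c]) ps s (Nat.le_trans hs (by simp))]
      have hdrop : (u ++ [c]).drop s = u.drop s ++ [c] := List.drop_append_of_le_length hs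
      simp only [pvPieces, h, if_true, hdrop, List.append_assoc, List.singleton_append]
    · simp only [List.foldl_cons, h, Bool.not_false, if_true]
      have hv : u ++ c :: v = (u ++ [c]) ++ v := by simp
      have hlen : (u.length : Int) + 1 = (((u ++ [c]).length : Nat) : Int) := by simp
      rw [hv, hlen, ih (u ++ [c]) (ps ++ [PySem.List.slice ((u ++ [c]) ++ v) (some (s : Int)) (some (u.length : Int))]) (u ++ [c]).length (le_refl _)]
      have hslice : PySem.List.slice ((u ++ [c]) ++ v) (some ((s : Nat) : Int)) (some ((u.length : Nat) : Int)) = u.drop s := by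
        rw [PySem.List.slice_natCast]
        have h1 : ((u ++ [c]) ++ v).drop s = u.drop s ++ ([c] ++ v) := by
          rw [List.append_assoc, List.drop_append_of_le_length (by omega)]
        have h2 : u.length - s = (u.drop s).length := by simp
        rw [h1, List.take_append_of_le_length (by omega), h2, List.take_length]
      rw [hslice]
      simp only [pvPieces, h, Bool.false_eq_true, if_false, List.drop_length, List.nil_append, List.append_nil,
        List.append_assoc, List.singleton_append]

-- ===== VERDICT (by name: the statement is the Claim_ definition above) =====
theorem get_strings_of_set_spec : Claim_equal_get_strings_of_set := by
  intro word char_set threshold _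
  show get_strings_of_set word char_set threshold = get_strings_of_set_alt word char_set threshold
  simp only [get_strings_of_set, get_strings_of_set_alt]
  have hA := pvA_loop char_set threshold word.toList [] PySem.Set.empty
  have hB := pvB_loop char_set word.toList [] [] 0 (by simp)
  simp only [List.length_nil, Nat.cast_zero, List.nil_append, List.drop_nil] at hA hB
  rw [hA, hB]
  rfl
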